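-- pv_equiv track=rewrite | github.com/johnnyhuang97/practice-problems | q1overlapcourses.py | backtrack
-- ===== SOURCE A (Python) =====
-- def backtrack(src, graph, temp, res):
--   childs = graph[src]
--   n = len(childs)
--   if n == 0:
--     res.add(temp[(len(temp)+1)// 2 - 1])
--     return res
--
--   for i in range(n):
--     nxt = graph[src][i]
--     temp.append(nxt)
--     res = backtrack(nxt, graph, temp, res)
--     temp.pop()
--   return res
-- ===== SOURCE B (Python) =====
-- def backtrack(src, graph, temp, res):
--     # Iterative DFS with an explicit stack of (node, path) frames instead of recursion.
--     # Mutates res in place (like the original); leaves temp untouched (the original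
--     # restores temp before returning, so its net effect on temp is also none).
--     stack = [(src, list(temp))]
--     while stack:
--         node, path = stack.pop()
--         childs = graph[node]
--         if not childs:
--             res.add(path[(len(path) + 1) // 2 - 1])
--         else:
--             for c in reversed(childs):
--                 stack.append((c, path + [c]))
--     return res
-- ===== Notes on version B (the rewrite author's own statement) =====
-- stated objective: alternative
-- what changed: Replaces A's recursive backtracking DFS (which appends/pops on a shared temp list) by an iterative DFS over an explicit stack of (node, path) frames, each frame carrying its own path copy.
import Mathlib
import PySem

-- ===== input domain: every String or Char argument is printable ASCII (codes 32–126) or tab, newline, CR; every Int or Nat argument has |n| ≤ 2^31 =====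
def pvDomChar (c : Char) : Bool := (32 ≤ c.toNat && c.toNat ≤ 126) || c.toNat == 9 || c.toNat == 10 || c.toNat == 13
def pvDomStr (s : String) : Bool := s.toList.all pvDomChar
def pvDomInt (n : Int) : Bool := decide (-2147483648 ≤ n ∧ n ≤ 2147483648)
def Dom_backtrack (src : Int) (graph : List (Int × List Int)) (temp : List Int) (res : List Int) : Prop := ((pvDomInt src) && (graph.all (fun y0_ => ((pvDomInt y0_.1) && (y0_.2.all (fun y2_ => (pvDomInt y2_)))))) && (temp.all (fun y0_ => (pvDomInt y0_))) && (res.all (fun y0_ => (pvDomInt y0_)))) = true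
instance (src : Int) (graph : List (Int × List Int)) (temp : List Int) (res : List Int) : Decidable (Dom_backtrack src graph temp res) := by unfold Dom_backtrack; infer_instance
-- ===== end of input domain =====

-- B replaces A's recursive DFS by an iterative DFS over an explicit stack of (node, path) frames
-- (objective: alternative decomposition, same cost).  Equivalence is about the RETURN value:
-- A mutates res in place and temp transiently (restored before returning); B mutates res the same
-- way and never touches temp.

-- shared helper: temp[(len(temp)+1)//2 - 1]  (the identical expression occurs in both Pythons;
-- .getD 0 is junk only where Python raises IndexError, i.e. an empty path — outside Pre_)
def pvMid (path : List Int) : Int :=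
  (PySem.List.pyGet? path (PySem.Int.floordiv ((path.length : Int) + 1) 2 - 1)).getD 0

-- graph[src]: Python dict lookup (KeyError = none, outside Pre_)
def pvGet (graph : List (Int × List Int)) (n : Int) : Option (List Int) :=
  (PySem.Dict.mk graph).get? n

-- maximum adjacency-list length (only used as a termination measure for the B port's stack loop)
def pvDeg (graph : List (Int × List Int)) : Nat :=
  graph.foldr (fun p m => max p.2.length m) 0

lemma pvGet_length_le_pvDeg (graph : List (Int × List Int)) (n : Int) (cs : List Int)
    (h : pvGet graph n = some cs) : cs.length ≤ pvDeg graph := by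
  induction graph with
  | nil => simp [pvGet, PySem.Dict.get?] at h
  | cons p rest ih =>
      rw [pvGet] at h
      rw [PySem.Dict.get?_mk_cons] at h
      by_cases hk : p.1 == n
      · simp [hk] at h; subst h; simp [pvDeg]
      · simp [hk] at h
        have := ih (by rw [pvGet]; exact h)
        simp [pvDeg] at this ⊢
        omega

lemma pvSum_map_const {A : Type} (xs : List A) (k : Nat) : (xs.map (fun _ => k)).sum = xs.length * k := by
  induction xs with
  | nil => simp
  | cons x xs ih => simp [Nat.succ_mul, Nat.add_comm]

-- ===== PORT A =====
-- literal port of A's recursion; fuel only makes the recursion total (never exhausted under Pre_)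
def goA (graph : List (Int × List Int)) (fuel : Nat) (src : Int) (temp res : List Int) : List Int :=
  match pvGet graph src with
  | none => res                     -- Python: KeyError (outside Pre_)
  | some childs =>
      if childs.isEmpty then PySem.Set.add res (pvMid temp)   -- res.add(temp[(len(temp)+1)//2-1])
      else
        match fuel with
        | 0 => res                  -- fuel guard only; unreachable under Pre_
        | f + 1 =>
            -- for i in range(n): temp.append(nxt); res = backtrack(...); temp.pop()
            childs.foldl (fun acc c => goA graph f c (temp ++ [c]) acc) res

def backtrack (src : Int) (graph : List (Int × List Int)) (temp : List Int) (res : List Int) : List Int :=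
  goA graph (graph.length + 1) src temp res

-- ===== PORT B =====
-- literal port of Source B's while-loop: the stack holds (fuel, node, path) frames in pop order
-- (Source B pushes reversed(childs) at the tail and pops from the tail; here the head is the top,
-- so pushing the children in order is the same traversal).  The per-frame fuel only makes the
-- loop total; it is never exhausted under Pre_.
def goB (graph : List (Int × List Int)) (stack : List (Nat × Int × List Int)) (res : List Int) : List Int :=
  match stack with
  | [] => res
  | (f, node, path) :: rest =>
      match h : pvGet graph node with
      | none => goB graph rest res       -- Python: KeyError (outside Pre_)
      | some childs =>
          if childs.isEmpty then goB graph rest (PySem.Set.add res (pvMid path))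
          else
            match f with
            | 0 => goB graph rest res    -- fuel guard only; unreachable under Pre_
            | f' + 1 => goB graph (childs.map (fun c => (f', c, path ++ [c])) ++ rest) res
termination_by (stack.map (fun fr => (pvDeg graph + 1) ^ fr.1)).sum
decreasing_by
  all_goals simp only [List.map_cons, List.sum_cons, List.map_append, List.sum_append,
    List.map_map, Function.comp_def]
  · exact Nat.lt_add_of_pos_left (Nat.pow_pos (by omega))
  · exact Nat.lt_add_of_pos_left (Nat.pow_pos (by omega))
  · exact Nat.lt_add_of_pos_left (Nat.pow_pos (by omega))
  · have hd : childs.length ≤ pvDeg graph := pvGet_length_le_pvDeg graph node childs h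
    rw [pvSum_map_const]
    have hlt : childs.length * (pvDeg graph + 1) ^ f' < (pvDeg graph + 1) ^ (f' + 1) := by
      have h1 : 0 < (pvDeg graph + 1) ^ f' := Nat.pow_pos (by omega)
      calc childs.length * (pvDeg graph + 1) ^ f'
          ≤ pvDeg graph * (pvDeg graph + 1) ^ f' := Nat.mul_le_mul_right _ hd
        _ < (pvDeg graph + 1) * (pvDeg graph + 1) ^ f' := (Nat.mul_lt_mul_right h1).mpr (by omega)
        _ = (pvDeg graph + 1) ^ (f' + 1) := by ring
    exact Nat.add_lt_add_right hlt _

def backtrack_alt (src : Int) (graph : List (Int × List Int)) (temp : List Int) (res : List Int) : List Int :=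
  goB graph [(graph.length + 1, src, temp)] res

-- ===== PRECONDITION & SPEC =====
-- closure helpers for Pre_: pvReach computes the forward-reachable set (BFS levels stabilise
-- within graph.length + 2 rounds on the stated domain)
def pvChilds (graph : List (Int × List Int)) (n : Int) : List Int := (pvGet graph n).getD []
def pvStep (graph : List (Int × List Int)) (S : List Int) : List Int :=
  S.foldl (fun acc n => PySem.Set.update acc (pvChilds graph n)) S
def pvReach (graph : List (Int × List Int)) (start : List Int) : List Int :=
  (pvStep graph)^[graph.length.succ.succ] (PySem.Set.ofList start)

-- Pre_ = the inputs on which the Python A returns normally: every node reachable from src is a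
-- key of graph (else KeyError), no reachable node lies on a cycle (else unbounded recursion),
-- and not (temp empty and src a leaf) (else IndexError on the empty temp).  The Nodup
-- conjunct only states that graph is a genuine dict image (a Python dict cannot carry
-- duplicate keys), so it excludes no representable input.
def Pre_backtrack (src : Int) (graph : List (Int × List Int)) (temp : List Int) (res : List Int) : Prop :=
  (graph.map Prod.fst).Nodup ∧
  (∀ r ∈ pvReach graph [src], (pvGet graph r).isSome = true) ∧
  (∀ r ∈ pvReach graph [src], r ∉ pvReach graph (pvChilds graph r)) ∧
  ¬(temp = [] ∧ pvChilds graph src = [])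
instance (src : Int) (graph : List (Int × List Int)) (temp : List Int) (res : List Int) : Decidable (Pre_backtrack src graph temp res) := by unfold Pre_backtrack; infer_instance

def pvWitness_backtrack : Int × (List (Int × List Int)) × List Int × List Int :=
  (0, [(0, [1]), (1, [])], [], [])

def Spec_backtrack (src : Int) (graph : List (Int × List Int)) (temp : List Int) (res : List Int) (out : List Int) : Prop := out = backtrack_alt src graph temp res
instance (src : Int) (graph : List (Int × List Int)) (temp : List Int) (res : List Int) (out : List Int) : Decidable (Spec_backtrack src graph temp res out) := by unfold Spec_backtrack; infer_instance

-- ===== CLAIM (what is proved, stated in full; the proofs are below) =====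
def Claim_equal_backtrack : Prop := ∀ (src : Int) (graph : List (Int × List Int)) (temp : List Int) (res : List Int), Dom_backtrack src graph temp res → Pre_backtrack src graph temp res → Spec_backtrack src graph temp res (backtrack src graph temp res)

-- ===== LEMMAS AND PROOFS =====

-- processing the top frame of the stack is exactly one recursive call of A's port
lemma goB_frame (graph : List (Int × List Int)) :
    ∀ (f : Nat) (node : Int) (path : List Int) (rest : List (Nat × Int × List Int)) (res : List Int),
      goB graph ((f, node, path) :: rest) res = goB graph rest (goA graph f node path res) := by
  intro f
  induction f with
  | zero =>
      intro node path rest res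
      rw [goB, goA]
      cases h : pvGet graph node with
      | none => rfl
      | some childs =>
          by_cases he : childs.isEmpty
          · simp [he]
          · simp [he]
  | succ f ih =>
      intro node path rest res
      rw [goB, goA]
      cases h : pvGet graph node with
      | none => rfl
      | some childs =>
          by_cases he : childs.isEmpty
          · simp [he]
          · simp only [he, if_false, Bool.false_eq_true]
            -- the pushed child frames are consumed exactly as A's foldl over the children
            have key : ∀ (cs : List Int) (rest : List (Nat × Int × List Int)) (res : List Int),
                goB graph (cs.map (fun c => (f, c, path ++ [c])) ++ rest) res
                  = goB graph rest (cs.foldl (fun acc c => goA graph f c (path ++ [c]) acc) res) := by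
              intro cs
              induction cs with
              | nil => intro rest res; simp
              | cons c cs' ihc =>
                  intro rest res
                  simp only [List.map_cons, List.cons_append, List.foldl_cons]
                  rw [ih, ihc]
            exact key childs rest res

theorem backtrack_spec : Claim_equal_backtrack := by
  intro src graph temp res _ _
  unfold Spec_backtrack backtrack backtrack_alt
  rw [goB_frame, goB]
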